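-- pv_equiv track=rewrite | github.com/r-jelly/program-solving | baekjoon/2823.py | solution
-- ===== SOURCE A (Python) =====
-- def solution(R, C, board):
--     roads = []
--     for i in range(R):
--         for j in range(C):
--             if board[i][j] == '.':
--                 roads.append((i, j))
--
--     move = [(1, 0), (-1, 0), (0, 1), (0, -1)]
--     for row, col in roads:
--         cnt = 0
--         for dx, dy in move:
--             if row+dx < 0 or row+dx >= R or col+dy < 0 or col+dy >=C:
--                 continue
--             if board[row+dx][col+dy] == '.':
--                 cnt += 1
--         if cnt < 2:
--             return False
--
--     return True
-- ===== SOURCE B (Python) =====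
-- def solution(R, C, board):
--     deg = {}
--     for i in range(R):
--         for j in range(C):
--             if board[i][j] == '.':
--                 deg[(i, j)] = 0
--     for (i, j) in list(deg):
--         if (i, j + 1) in deg:
--             deg[(i, j)] += 1
--             deg[(i, j + 1)] += 1
--         if (i + 1, j) in deg:
--             deg[(i, j)] += 1
--             deg[(i + 1, j)] += 1
--     return all(v >= 2 for v in deg.values())
-- ===== Notes on version B (the rewrite author's own statement) =====
-- stated objective: alternative
-- what changed: A scans each road cell's four neighbours with explicit bounds checks; B instead builds a degree dict over all road cells and accumulates degrees edge-wise (right and down adjacent road pairs, +1 to both endpoints), then checks every degree is >= 2.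
import Mathlib
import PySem

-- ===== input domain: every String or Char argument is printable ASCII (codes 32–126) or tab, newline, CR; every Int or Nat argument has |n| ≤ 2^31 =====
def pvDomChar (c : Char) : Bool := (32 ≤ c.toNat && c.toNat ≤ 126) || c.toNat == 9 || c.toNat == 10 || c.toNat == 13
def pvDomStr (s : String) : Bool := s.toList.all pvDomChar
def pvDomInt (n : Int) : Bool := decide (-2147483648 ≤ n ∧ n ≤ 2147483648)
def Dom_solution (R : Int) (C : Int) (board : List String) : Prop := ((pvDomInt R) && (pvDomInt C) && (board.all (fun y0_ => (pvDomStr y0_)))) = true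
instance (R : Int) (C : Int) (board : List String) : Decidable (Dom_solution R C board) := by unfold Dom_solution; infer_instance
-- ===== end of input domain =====

-- B replaces A's per-cell 4-neighbour bounds-checked scan by edge-based degree accumulation
-- in a dict over the road cells (objective: alternative decomposition, similar cost).

-- shared cell accessor: board[i][j]; the default '#' is only reachable outside Pre_solution
def pvCell (board : List String) (i j : Int) : Char :=
  PySem.List.pyGetD (PySem.List.pyGetD (board.map String.toList) i []) j '#'

-- ===== PORT A =====
def solution (R : Int) (C : Int) (board : List String) : Bool :=
  let roads := (PySem.List.pyRange 0 R 1).foldl (fun acc i =>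
      (PySem.List.pyRange 0 C 1).foldl (fun acc j =>
        if pvCell board i j = '.' then acc ++ [(i, j)] else acc) acc) ([] : List (Int × Int))
  let move : List (Int × Int) := [(1, 0), (-1, 0), (0, 1), (0, -1)]
  -- 'for row, col in roads: … if cnt < 2: return False' / 'return True' = short-circuit all
  roads.all fun rc =>
    let cnt := move.foldl (fun cnt d =>
      if rc.1 + d.1 < 0 ∨ rc.1 + d.1 ≥ R ∨ rc.2 + d.2 < 0 ∨ rc.2 + d.2 ≥ C then cnt
      else if pvCell board (rc.1 + d.1) (rc.2 + d.2) = '.' then cnt + 1 else cnt) (0 : Int)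
    decide (¬ cnt < 2)

-- ===== PORT B =====
-- phase 2: 'deg[k] += 1' on a key known to be present = Dict.modify k 0 (· + 1)
def solution_alt (R : Int) (C : Int) (board : List String) : Bool :=
  let deg : PySem.Dict (Int × Int) Int :=
    (PySem.List.pyRange 0 R 1).foldl (fun d i =>
      (PySem.List.pyRange 0 C 1).foldl (fun d j =>
        if pvCell board i j = '.' then d.insert (i, j) 0 else d) d) PySem.Dict.empty
  let deg2 := deg.keys.foldl (fun d p =>
    let d := if d.contains (p.1, p.2 + 1) then
        (d.modify (p.1, p.2) 0 (· + 1)).modify (p.1, p.2 + 1) 0 (· + 1) else d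
    if d.contains (p.1 + 1, p.2) then
        (d.modify (p.1, p.2) 0 (· + 1)).modify (p.1 + 1, p.2) 0 (· + 1) else d) deg
  deg2.values.all fun v => decide (v ≥ 2)

-- ===== PRECONDITION & SPEC =====
-- Pre_ excludes exactly the inputs where Python A raises IndexError: a positive R,C scan
-- that reaches a missing row (R > len(board)) or a row shorter than C.
def Pre_solution (R : Int) (C : Int) (board : List String) : Prop :=
  (0 < R ∧ 0 < C) → (R ≤ (board.length : Int) ∧ ∀ s ∈ board.take R.toNat, C ≤ (s.toList.length : Int))
instance (R : Int) (C : Int) (board : List String) : Decidable (Pre_solution R C board) := by unfold Pre_solution; infer_instance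
def pvWitness_solution : Int × Int × List String := (2, 2, ["..", ".."])

def Spec_solution (R : Int) (C : Int) (board : List String) (out : Bool) : Prop := out = solution_alt R C board
instance (R : Int) (C : Int) (board : List String) (out : Bool) : Decidable (Spec_solution R C board out) := by unfold Spec_solution; infer_instance

-- ===== CLAIM (what is proved, stated in full; the proofs are below) =====
def Claim_equal_solution : Prop := ∀ (R : Int) (C : Int) (board : List String), Dom_solution R C board → Pre_solution R C board → Spec_solution R C board (solution R C board)

-- ===== LEMMAS AND PROOFS =====

-- the set of road cells, as a Bool predicate and as the list both programs enumerate
def pvRoadB (R C : Int) (board : List String) (p : Int × Int) : Bool :=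
  decide (0 ≤ p.1) && decide (p.1 < R) && decide (0 ≤ p.2) && decide (p.2 < C) &&
    decide (pvCell board p.1 p.2 = '.')

def pvRoads (R C : Int) (board : List String) : List (Int × Int) :=
  ((PySem.List.pyRange 0 R 1) ×ˢ (PySem.List.pyRange 0 C 1)).filter (pvRoadB R C board)

lemma pvRoadB_iff (R C : Int) (board : List String) (p : Int × Int) :
    pvRoadB R C board p = true ↔
      0 ≤ p.1 ∧ p.1 < R ∧ 0 ≤ p.2 ∧ p.2 < C ∧ pvCell board p.1 p.2 = '.' := by
  simp [pvRoadB, and_assoc]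

lemma pvRoads_flat (R C : Int) (board : List String) :
    (PySem.List.pyRange 0 R 1).flatMap (fun i =>
        ((PySem.List.pyRange 0 C 1).filter (fun j => decide (pvCell board i j = '.'))).map
          (fun j => (i, j))) = pvRoads R C board := by
  unfold pvRoads
  rw [show ((PySem.List.pyRange 0 R 1) ×ˢ (PySem.List.pyRange 0 C 1)).filter (pvRoadB R C board)
        = (PySem.List.pyRange 0 R 1).flatMap
            (fun i => ((PySem.List.pyRange 0 C 1).map (fun j => (i, j))).filter (pvRoadB R C board))
      from by
        show ((PySem.List.pyRange 0 R 1).flatMap fun i =>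
          (PySem.List.pyRange 0 C 1).map (fun j => (i, j))).filter _ = _
        rw [List.filter_flatMap]]
  apply List.flatMap_congr
  intro i hi
  rw [List.filter_map]
  rw [PySem.List.mem_pyRange_one] at hi
  have hf : (PySem.List.pyRange 0 C 1).filter (fun j => decide (pvCell board i j = '.'))
      = (PySem.List.pyRange 0 C 1).filter ((pvRoadB R C board) ∘ (fun j => (i, j))) := by
    apply List.filter_congr
    intro j hj
    rw [PySem.List.mem_pyRange_one] at hj
    simp [pvRoadB, hi.1, hi.2, hj.1, hj.2]
  rw [hf]

lemma mem_pvRoads (R C : Int) (board : List String) (p : Int × Int) :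
    p ∈ pvRoads R C board ↔ pvRoadB R C board p = true := by
  unfold pvRoads
  rw [List.mem_filter]
  constructor
  · exact fun h => h.2
  · intro h
    refine ⟨?_, h⟩
    rw [pvRoadB_iff] at h
    rcases p with ⟨i, j⟩
    rw [show ((PySem.List.pyRange 0 R 1) ×ˢ (PySem.List.pyRange 0 C 1))
          = (PySem.List.pyRange 0 R 1).product (PySem.List.pyRange 0 C 1) from rfl,
        List.pair_mem_product, PySem.List.mem_pyRange_one, PySem.List.mem_pyRange_one]
    exact ⟨⟨h.1, h.2.1⟩, h.2.2.1, h.2.2.2.1⟩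

lemma nodup_pvRoads (R C : Int) (board : List String) : (pvRoads R C board).Nodup := by
  exact List.Nodup.filter _ (List.Nodup.product (PySem.List.nodup_pyRange_one 0 R)
    (PySem.List.nodup_pyRange_one 0 C))

-- A's roads list is pvRoads
lemma roadsA_eq (R C : Int) (board : List String) :
    (PySem.List.pyRange 0 R 1).foldl (fun acc i =>
      (PySem.List.pyRange 0 C 1).foldl (fun acc j =>
        if pvCell board i j = '.' then acc ++ [(i, j)] else acc) acc) ([] : List (Int × Int))
      = pvRoads R C board := by
  rw [show (fun (acc : List (Int × Int)) i =>
        (PySem.List.pyRange 0 C 1).foldl (fun acc j =>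
          if pvCell board i j = '.' then acc ++ [(i, j)] else acc) acc)
      = fun (acc : List (Int × Int)) i =>
          acc ++ ((PySem.List.pyRange 0 C 1).filter
            (fun j => decide (pvCell board i j = '.'))).map (fun j => (i, j)) from by
        funext acc i
        exact PySem.List.foldl_append_ite (p := fun j => pvCell board i j = '.') (fun j => (i, j)) _ _]
  rw [PySem.List.foldl_append_eq_flatMap, List.nil_append]
  exact pvRoads_flat R C board

-- B's phase-1 dict
lemma phase1_items (R C : Int) (board : List String) :
    ((PySem.List.pyRange 0 R 1).foldl (fun d i =>
      (PySem.List.pyRange 0 C 1).foldl (fun d j =>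
        if pvCell board i j = '.' then d.insert (i, j) 0 else d) d)
      (PySem.Dict.empty : PySem.Dict (Int × Int) Int)).items
      = (pvRoads R C board).map (fun p => (p, (0 : Int))) := by
  rw [show (fun (d : PySem.Dict (Int × Int) Int) i =>
        (PySem.List.pyRange 0 C 1).foldl (fun d j =>
          if pvCell board i j = '.' then d.insert (i, j) 0 else d) d)
      = fun (d : PySem.Dict (Int × Int) Int) i =>
          (((PySem.List.pyRange 0 C 1).filter
            (fun j => decide (pvCell board i j = '.'))).map (fun j => (i, j))).foldl
              (fun d p => d.insert p 0) d from by
        funext d i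
        rw [PySem.List.foldl_ite_eq_foldl_filter, List.foldl_map]]
  rw [← List.foldl_flatMap, pvRoads_flat]
  have h := PySem.Dict.items_foldl_insert_fresh (l := pvRoads R C board)
    (k := fun p => p) (v := fun _ => (0 : Int)) (d := PySem.Dict.empty)
    (fun a _ => PySem.Dict.contains_empty a) (by simpa using nodup_pvRoads R C board)
  simpa using h

-- contribution of processing road cell p to the degree of q
def pvInc (S : List (Int × Int)) (q p : Int × Int) : Int :=
  (if (p.1, p.2 + 1) ∈ S then
      (if p = q then 1 else 0) + (if ((p.1, p.2 + 1) : Int × Int) = q then 1 else 0) else 0)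
  + (if (p.1 + 1, p.2) ∈ S then
      (if p = q then 1 else 0) + (if ((p.1 + 1, p.2) : Int × Int) = q then 1 else 0) else 0)

lemma getD_bump (e : PySem.Dict (Int × Int) Int) (x q : Int × Int) :
    (e.modify x 0 (· + 1)).getD q 0 = e.getD q 0 + (if q = x then 1 else 0) := by
  rw [PySem.Dict.getD_modify]
  split_ifs with h
  · rw [h]
  · ring

lemma keys_bump (S : List (Int × Int)) (e : PySem.Dict (Int × Int) Int) (x : Int × Int)
    (h : e.keys = S) (hx : x ∈ S) : (e.modify x 0 (· + 1)).keys = S := by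
  rw [PySem.Dict.keys_modify, PySem.Dict.keys_insert_of_contains]
  · exact h
  · rw [PySem.Dict.contains_eq_decide_mem_keys, h]
    simpa using hx

lemma pvStep_lemma (S : List (Int × Int)) (d : PySem.Dict (Int × Int) Int)
    (p : Int × Int) (hp : p ∈ S) (hk : d.keys = S) :
    ((fun (d : PySem.Dict (Int × Int) Int) (p : Int × Int) =>
        let d := if d.contains (p.1, p.2 + 1) then
            (d.modify (p.1, p.2) 0 (· + 1)).modify (p.1, p.2 + 1) 0 (· + 1) else d
        if d.contains (p.1 + 1, p.2) then
            (d.modify (p.1, p.2) 0 (· + 1)).modify (p.1 + 1, p.2) 0 (· + 1) else d) d p).keys = S ∧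
    ∀ q, ((fun (d : PySem.Dict (Int × Int) Int) (p : Int × Int) =>
        let d := if d.contains (p.1, p.2 + 1) then
            (d.modify (p.1, p.2) 0 (· + 1)).modify (p.1, p.2 + 1) 0 (· + 1) else d
        if d.contains (p.1 + 1, p.2) then
            (d.modify (p.1, p.2) 0 (· + 1)).modify (p.1 + 1, p.2) 0 (· + 1) else d) d p).getD q 0
      = d.getD q 0 + pvInc S q p := by
  obtain ⟨p1, p2⟩ := p
  have hcont : ∀ (e : PySem.Dict (Int × Int) Int) (x : Int × Int),
      e.keys = S → e.contains x = decide (x ∈ S) := fun e x h => by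
    rw [PySem.Dict.contains_eq_decide_mem_keys, h]
  by_cases hR : ((p1, p2 + 1) : Int × Int) ∈ S <;> by_cases hD : ((p1 + 1, p2) : Int × Int) ∈ S
  · have hk1 : ((d.modify (p1, p2) 0 (· + 1)).modify (p1, p2 + 1) 0 (· + 1)).keys = S :=
      keys_bump S _ _ (keys_bump S d _ hk hp) hR
    have hk2 := keys_bump S _ _ (keys_bump S _ _ hk1 hp) hD
    simp only [hcont _ _ hk, hcont _ _ hk1, hR, hD, decide_true, if_true]
    refine ⟨hk2, fun q => ?_⟩
    obtain ⟨q1, q2⟩ := q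
    simp only [getD_bump, pvInc, hR, hD, if_true, Prod.mk.injEq]
    split_ifs <;> omega
  · have hk1 : ((d.modify (p1, p2) 0 (· + 1)).modify (p1, p2 + 1) 0 (· + 1)).keys = S :=
      keys_bump S _ _ (keys_bump S d _ hk hp) hR
    simp only [hcont _ _ hk, hcont _ _ hk1, hR, hD, decide_true, decide_false,
      Bool.false_eq_true, if_true, if_false]
    refine ⟨hk1, fun q => ?_⟩
    obtain ⟨q1, q2⟩ := q
    simp only [getD_bump, pvInc, hR, hD, if_true, if_false, Prod.mk.injEq]
    split_ifs <;> omega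
  · have hk1 := keys_bump S _ _ (keys_bump S d _ hk hp) hD
    simp only [hcont _ _ hk, hR, hD, decide_true, decide_false,
      Bool.false_eq_true, if_true, if_false]
    refine ⟨hk1, fun q => ?_⟩
    obtain ⟨q1, q2⟩ := q
    simp only [getD_bump, pvInc, hR, hD, if_true, if_false, Prod.mk.injEq]
    split_ifs <;> omega
  · simp only [hcont _ _ hk, hR, hD, decide_false, Bool.false_eq_true, if_false]
    refine ⟨hk, fun q => ?_⟩
    simp [pvInc, hR, hD]

lemma phase2_fold (S : List (Int × Int)) (L : List (Int × Int)) (hL : ∀ p ∈ L, p ∈ S) :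
    ∀ (d : PySem.Dict (Int × Int) Int), d.keys = S →
      (L.foldl (fun d p =>
        let d := if d.contains (p.1, p.2 + 1) then
            (d.modify (p.1, p.2) 0 (· + 1)).modify (p.1, p.2 + 1) 0 (· + 1) else d
        if d.contains (p.1 + 1, p.2) then
            (d.modify (p.1, p.2) 0 (· + 1)).modify (p.1 + 1, p.2) 0 (· + 1) else d) d).keys = S ∧
      ∀ q, (L.foldl (fun d p =>
        let d := if d.contains (p.1, p.2 + 1) then
            (d.modify (p.1, p.2) 0 (· + 1)).modify (p.1, p.2 + 1) 0 (· + 1) else d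
        if d.contains (p.1 + 1, p.2) then
            (d.modify (p.1, p.2) 0 (· + 1)).modify (p.1 + 1, p.2) 0 (· + 1) else d) d).getD q 0
        = d.getD q 0 + (L.map (pvInc S q)).sum := by
  induction L with
  | nil => intro d hk; exact ⟨hk, fun q => by simp⟩
  | cons p t ih =>
    intro d hk
    have hp : p ∈ S := hL p (by simp)
    have hstep := pvStep_lemma S d p hp hk
    have iht := ih (fun x hx => hL x (by simp [hx]))
    rw [List.foldl_cons]
    obtain ⟨hk2, hv2⟩ := iht _ hstep.1
    refine ⟨hk2, fun q => ?_⟩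
    rw [hv2 q, hstep.2 q]
    simp [add_assoc]

lemma sum_indicator (S : List (Int × Int)) (hnd : S.Nodup) (a : Int × Int) (c : Int) :
    (S.map (fun p => if p = a then c else 0)).sum = if a ∈ S then c else 0 := by
  induction S with
  | nil => simp
  | cons x t ih =>
    simp only [List.nodup_cons] at hnd
    by_cases hx : x = a
    · subst hx
      simp [hnd.1, ih hnd.2]
    · simp [hx, ih hnd.2, Ne.symm hx]

lemma sum_pvInc (S : List (Int × Int)) (hnd : S.Nodup) (q : Int × Int) (hq : q ∈ S) :
    (S.map (pvInc S q)).sum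
      = (if ((q.1 + 1, q.2) : Int × Int) ∈ S then 1 else 0)
        + (if ((q.1 - 1, q.2) : Int × Int) ∈ S then 1 else 0)
        + (if ((q.1, q.2 + 1) : Int × Int) ∈ S then 1 else 0)
        + (if ((q.1, q.2 - 1) : Int × Int) ∈ S then 1 else 0) := by
  obtain ⟨q1, q2⟩ := q
  have hpt : ∀ p : Int × Int, pvInc S (q1, q2) p
      = (if p = ((q1, q2) : Int × Int) then ((if ((q1, q2 + 1) : Int × Int) ∈ S then 1 else 0)
            + (if ((q1 + 1, q2) : Int × Int) ∈ S then (1 : Int) else 0)) else 0)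
        + ((if p = ((q1, q2 - 1) : Int × Int) then 1 else 0)
        + (if p = ((q1 - 1, q2) : Int × Int) then 1 else 0)) := by
    rintro ⟨p1, p2⟩
    by_cases e1 : p1 = q1 ∧ p2 = q2
    · obtain ⟨rfl, rfl⟩ := e1
      simp only [pvInc, Prod.mk.injEq, true_and, and_true, if_true]
      split_ifs <;> omega
    · by_cases e2 : p1 = q1 ∧ p2 = q2 - 1
      · obtain ⟨rfl, rfl⟩ := e2
        simp only [pvInc, Prod.mk.injEq, true_and, if_true]
        rw [show q2 - 1 + 1 = q2 from by omega, if_pos hq]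
        split_ifs <;> omega
      · by_cases e3 : p1 = q1 - 1 ∧ p2 = q2
        · obtain ⟨rfl, rfl⟩ := e3
          simp only [pvInc, Prod.mk.injEq, and_true, if_true]
          rw [show q1 - 1 + 1 = q1 from by omega, if_pos hq]
          split_ifs <;> omega
        · simp only [pvInc, Prod.mk.injEq]
          split_ifs <;> omega
  rw [List.map_congr_left (fun p _ => hpt p)]
  rw [PySem.List.sum_map_add_int, PySem.List.sum_map_add_int,
    sum_indicator S hnd, sum_indicator S hnd, sum_indicator S hnd]
  rw [if_pos hq]
  split_ifs <;> ring

lemma pvGuard_step (R C : Int) (board : List String) (cnt a b : Int) :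
    (if a < 0 ∨ a ≥ R ∨ b < 0 ∨ b ≥ C then cnt
      else if pvCell board a b = '.' then cnt + 1 else cnt)
    = cnt + (if pvRoadB R C board (a, b) = true then 1 else 0) := by
  have hiff : (pvRoadB R C board (a, b) = true)
      ↔ (¬(a < 0 ∨ a ≥ R ∨ b < 0 ∨ b ≥ C) ∧ pvCell board a b = '.') := by
    simp only [pvRoadB]
    constructor
    · intro h
      simp only [Bool.and_eq_true, decide_eq_true_eq] at h
      exact ⟨by omega, h.2⟩
    · rintro ⟨hg, hc⟩
      simp only [Bool.and_eq_true, decide_eq_true_eq]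
      refine ⟨⟨⟨⟨by omega, by omega⟩, by omega⟩, by omega⟩, hc⟩
  rw [if_congr hiff rfl rfl]
  split_ifs <;> first | omega | tauto

lemma cntA_eq (R C : Int) (board : List String) (q : Int × Int) :
    ([( (1:Int), (0:Int) ), (-1, 0), (0, 1), (0, -1)].foldl (fun cnt d =>
      if q.1 + d.1 < 0 ∨ q.1 + d.1 ≥ R ∨ q.2 + d.2 < 0 ∨ q.2 + d.2 ≥ C then cnt
      else if pvCell board (q.1 + d.1) (q.2 + d.2) = '.' then cnt + 1 else cnt) (0 : Int))
    = (if ((q.1 + 1, q.2) : Int × Int) ∈ pvRoads R C board then 1 else 0)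
      + (if ((q.1 - 1, q.2) : Int × Int) ∈ pvRoads R C board then 1 else 0)
      + (if ((q.1, q.2 + 1) : Int × Int) ∈ pvRoads R C board then 1 else 0)
      + (if ((q.1, q.2 - 1) : Int × Int) ∈ pvRoads R C board then 1 else 0) := by
  simp only [List.foldl_cons, List.foldl_nil, pvGuard_step, mem_pvRoads]
  norm_num [sub_eq_add_neg]

lemma all_congr_mem {α : Type} (l : List α) (f g : α → Bool) (h : ∀ x ∈ l, f x = g x) :
    l.all f = l.all g := by
  induction l with
  | nil => rfl
  | cons a t ih => simp_all

-- ===== VERDICT (by name: the statement is the Claim_ definition above) =====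
lemma phase1_keys (R C : Int) (board : List String) :
    ((PySem.List.pyRange 0 R 1).foldl (fun d i =>
      (PySem.List.pyRange 0 C 1).foldl (fun d j =>
        if pvCell board i j = '.' then d.insert (i, j) 0 else d) d)
      (PySem.Dict.empty : PySem.Dict (Int × Int) Int)).keys = pvRoads R C board := by
  simp [PySem.Dict.keys, phase1_items, List.map_map, Function.comp_def]

lemma phase1_getD (R C : Int) (board : List String) (q : Int × Int) :
    ((PySem.List.pyRange 0 R 1).foldl (fun d i =>
      (PySem.List.pyRange 0 C 1).foldl (fun d j =>
        if pvCell board i j = '.' then d.insert (i, j) 0 else d) d)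
      (PySem.Dict.empty : PySem.Dict (Int × Int) Int)).getD q 0 = 0 := by
  set d1 := (PySem.List.pyRange 0 R 1).foldl (fun d i =>
      (PySem.List.pyRange 0 C 1).foldl (fun d j =>
        if pvCell board i j = '.' then d.insert (i, j) 0 else d) d)
      (PySem.Dict.empty : PySem.Dict (Int × Int) Int) with hd1
  by_cases hc : d1.contains q = true
  · have hmem : q ∈ d1.keys := (PySem.Dict.contains_iff_mem_keys d1 q).mp hc
    rw [phase1_keys] at hmem
    have hnd : d1.keys.Nodup := by rw [phase1_keys]; exact nodup_pvRoads R C board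
    refine PySem.Dict.getD_of_mem_items d1 ?_ hnd 0
    rw [hd1, phase1_items]
    exact List.mem_map_of_mem hmem
  · exact PySem.Dict.getD_of_not_contains d1 0 (by simpa using hc)

theorem solution_spec : Claim_equal_solution := by
  intro R C board _ _
  show solution R C board = solution_alt R C board
  simp only [solution, solution_alt]
  rw [roadsA_eq]
  have hkeys := phase1_keys R C board
  obtain ⟨hk2, hv2⟩ :=
    phase2_fold (pvRoads R C board) (pvRoads R C board) (fun p hp => hp) _ hkeys
  rw [hkeys]
  rw [PySem.Dict.values_eq_map_keys _ (by rw [hk2]; exact nodup_pvRoads R C board) 0, hk2,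
    List.all_map]
  apply all_congr_mem
  intro q hq
  simp only [Function.comp_apply]
  rw [hv2 q, phase1_getD, zero_add,
    sum_pvInc (pvRoads R C board) (nodup_pvRoads R C board) q hq,
    cntA_eq R C board q]
  generalize (if ((q.1 + 1, q.2) : Int × Int) ∈ pvRoads R C board then (1:Int) else 0)
      + (if ((q.1 - 1, q.2) : Int × Int) ∈ pvRoads R C board then 1 else 0)
      + (if ((q.1, q.2 + 1) : Int × Int) ∈ pvRoads R C board then 1 else 0)
      + (if ((q.1, q.2 - 1) : Int × Int) ∈ pvRoads R C board then 1 else 0) = x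
  simp only [ge_iff_le, Int.not_lt]
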